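-- pv_equiv track=rewrite | github.com/stephane-delire/Memoire-implementation | cqa/sources2/attack_graph.py | build_attack_graph
-- ===== SOURCE A (Python) =====
-- def build_attack_graph(query):
--     """
--     Construit le graphe d'attaque en respectant la définition stricte de l'article :
--     - Une attaque existe de F vers G si une variable de clé primaire de G
--       est atteignable depuis F via la closure fonctionnelle.
--
--     On considère tant les atomes positifs que négatifs (voir Section 4.1 de l'article).
--     """
--     atoms = [(neg, pred, pk_len, args) for (neg, pred, pk_len, args) in query]
--     graph = dict()
--
--     # Construction du set des dépendances fonctionnelles
--     # Seuls les atomes positifs fournissent des dépendances fonctionnelles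
--     dependencies = []
--     for neg, pred, pk_len, args in atoms:
--         if not neg:  # uniquement les atomes positifs
--             key = args[:pk_len]
--             for var in args:
--                 if var not in key:
--                     dependencies.append((key, var))
--
--     # Fonction pour calculer la closure stricte
--     def closure(vars_init):
--         closure_set = set(vars_init)
--         changed = True
--         while changed:
--             changed = False
--             for key_vars, var in dependencies:
--                 if set(key_vars).issubset(closure_set) and var not in closure_set:
--                     closure_set.add(var)
--                     changed = True
--         return closure_set
--
--     # Construction rigoureuse du graphe d'attaque
--     for f in atoms:
--         f_neg, f_pred, f_pk_len, f_args = f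
--         graph[f] = []
--
--         f_vars = set(f_args)
--         f_closure = closure(f_vars)
--
--         for g in atoms:
--             if f == g:
--                 continue  # pas d'attaque sur soi-même
--
--             g_neg, g_pred, g_pk_len, g_args = g
--             g_pk_vars = set(g_args[:g_pk_len])
--
--             # Ultra rigoureux : vérifier que la clé primaire entière de G est atteinte
--             if not g_pk_vars:
--                 continue  # Pas de clé primaire ? Impossible d'attaquer
--             if g_pk_vars.issubset(f_closure):
--                 graph[f].append(g)
--
--     return graph
-- ===== SOURCE B (Python) =====
-- def build_attack_graph(query):
--     """Attack graph via a linear worklist attribute-closure (Beeri-Bernstein style):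
--     each functional dependency carries a counter of its still-missing distinct key
--     variables and an attribute-to-dependency index is built once; a dependency fires
--     the moment its counter reaches zero, so there are no repeated passes over the
--     dependency list and no repeated key-subset tests."""
--     atoms = [(neg, pred, pk_len, args) for (neg, pred, pk_len, args) in query]
--
--     dependencies = []
--     for neg, pred, pk_len, args in atoms:
--         if not neg:
--             key = args[:pk_len]
--             for var in args:
--                 if var not in key:
--                     dependencies.append((key, var))
--
--     # per dependency: the count of distinct key variables; index: attribute -> the
--     # dependencies whose key mentions it; key-less dependencies fire for free
--     base = []
--     index = {}
--     free = []
--     for i, (key, var) in enumerate(dependencies):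
--         kset = set(key)
--         base.append(len(kset))
--         if kset:
--             for k in kset:
--                 index.setdefault(k, []).append(i)
--         else:
--             free.append(var)
--
--     def closure(seed):
--         closed = set()
--         wl = []
--         def push(x):
--             if x not in closed:
--                 closed.add(x)
--                 wl.append(x)
--         for v in seed:
--             push(v)
--         for v in free:
--             push(v)
--         cnt = base.copy()
--         while wl:
--             v = wl.pop(0)
--             for i in index.get(v, []):
--                 cnt[i] -= 1
--                 if cnt[i] == 0:
--                     push(dependencies[i][1])
--         return closed
--
--     graph = {}
--     for f in atoms:
--         fc = closure(f[3])
--         graph[f] = [g for g in atoms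
--                     if g != f and g[3][:g[2]] and all(k in fc for k in g[3][:g[2]])]
--     return graph
-- ===== Notes on version B (the rewrite author's own statement) =====
-- stated objective: faster
-- what changed: A's pass-until-no-change fixpoint closure is replaced by a linear worklist attribute-closure (Beeri-Bernstein style): an attribute-to-dependency index plus a per-dependency counter of still-missing distinct key variables are built once, and a dependency fires the moment its counter hits zero, so there are no repeated passes over the dependency list and no repeated key-subset tests.
import Mathlib
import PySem

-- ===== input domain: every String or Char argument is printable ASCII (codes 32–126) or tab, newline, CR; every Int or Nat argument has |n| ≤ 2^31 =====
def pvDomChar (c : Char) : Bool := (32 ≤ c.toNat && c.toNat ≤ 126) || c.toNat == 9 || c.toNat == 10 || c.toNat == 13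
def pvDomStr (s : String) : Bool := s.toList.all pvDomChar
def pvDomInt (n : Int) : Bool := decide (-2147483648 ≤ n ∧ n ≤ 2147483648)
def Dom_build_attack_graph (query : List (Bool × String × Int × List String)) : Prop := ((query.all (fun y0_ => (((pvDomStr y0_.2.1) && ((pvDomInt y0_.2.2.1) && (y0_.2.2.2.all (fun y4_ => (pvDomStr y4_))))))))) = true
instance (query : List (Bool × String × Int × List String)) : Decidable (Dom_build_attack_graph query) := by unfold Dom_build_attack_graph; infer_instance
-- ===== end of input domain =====

-- B replaces A's pass-until-no-change fixpoint closure by a linear worklist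
-- attribute-closure: an attribute-to-dependency index and per-dependency counters of
-- missing key variables are built once and a dependency fires when its counter hits
-- zero; objective: faster (measured).


-- ===== PORT A =====
-- dependencies list: for each positive atom, (key, var) for every var of args not in key
def pvDepsA (atoms : List (Bool × String × Int × List String)) : List (List String × String) :=
  atoms.foldl (fun deps a =>
    if !a.1 then
      let key := PySem.List.slice a.2.2.2 none (some a.2.2.1)
      a.2.2.2.foldl (fun deps var => if var ∈ key then deps else deps ++ [(key, var)]) deps
    else deps) []

-- one step of A's inner 'for key_vars, var in dependencies' loop (state: closure set, changed flag)
def pvStepA (st : PySem.Set String × Bool) (d : List String × String) : PySem.Set String × Bool :=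
  if (PySem.Set.ofList d.1).issubset st.1 && !(st.1.contains d.2) then (st.1.add d.2, true) else st

-- one full pass of A's while-body
def pvPassA (deps : List (List String × String)) (st : PySem.Set String × Bool) : PySem.Set String × Bool :=
  deps.foldl pvStepA st

-- lemmas the port needs for termination of the while-changed loop
lemma pvPassA_mono (deps : List (List String × String)) :
    ∀ (st : PySem.Set String × Bool) (x : String), x ∈ st.1 → x ∈ (pvPassA deps st).1 := by
  induction deps with
  | nil => intro st x h; simpa [pvPassA] using h
  | cons d tl ih =>
    intro st x h
    simp only [pvPassA, List.foldl_cons] at *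
    apply ih
    by_cases hc : ((PySem.Set.ofList d.1).issubset st.1 && !(st.1.contains d.2)) = true
    · have hstep : pvStepA st d = (st.1.add d.2, true) := by unfold pvStepA; rw [if_pos hc]
      rw [hstep]
      exact (PySem.Set.mem_add st.1 d.2 x).2 (Or.inl h)
    · have hstep : pvStepA st d = st := by unfold pvStepA; rw [if_neg hc]
      rw [hstep]; exact h

lemma pvPassA_changed (deps : List (List String × String)) :
    ∀ (st : PySem.Set String × Bool), (pvPassA deps st).2 = true →
      st.2 = true ∨ ∃ d ∈ deps, d.2 ∉ st.1 ∧ d.2 ∈ (pvPassA deps st).1 := by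
  induction deps with
  | nil => intro st h; left; simpa [pvPassA] using h
  | cons d tl ih =>
    intro st h
    simp only [pvPassA, List.foldl_cons] at h ⊢
    by_cases hc : ((PySem.Set.ofList d.1).issubset st.1 && !(st.1.contains d.2)) = true
    · have hc' := hc
      simp only [Bool.and_eq_true, Bool.not_eq_true'] at hc'
      have hnot : d.2 ∉ st.1 := fun hm => by
        rw [(PySem.Set.contains_iff st.1 d.2).2 hm] at hc'; exact absurd hc'.2 (by simp)
      have hstep : pvStepA st d = (st.1.add d.2, true) := by unfold pvStepA; rw [if_pos hc]
      refine Or.inr ⟨d, List.mem_cons_self, hnot, ?_⟩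
      rw [hstep]
      exact pvPassA_mono tl _ _ ((PySem.Set.mem_add st.1 d.2 d.2).2 (Or.inr rfl))
    · have hstep : pvStepA st d = st := by unfold pvStepA; rw [if_neg hc]
      rw [hstep] at h ⊢
      rcases ih st h with h2 | ⟨d0, hd0, hn, hm⟩
      · exact Or.inl h2
      · exact Or.inr ⟨d0, List.mem_cons_of_mem _ hd0, hn, hm⟩

lemma pvCountP_lt {α : Type} (l : List α) (p q : α → Bool)
    (h : ∀ a ∈ l, p a = true → q a = true)
    (a0 : α) (h0 : a0 ∈ l) (hq : q a0 = true) (hp : p a0 = false) :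
    l.countP p < l.countP q := by
  induction l with
  | nil => cases h0
  | cons b tl ih =>
    rcases List.mem_cons.1 h0 with rfl | h0'
    · have h1 : tl.countP p ≤ tl.countP q :=
        List.countP_mono_left (fun a ha => h a (List.mem_cons_of_mem _ ha))
      simpa [hp, hq] using h1
    · have h1 := ih (fun a ha => h a (List.mem_cons_of_mem _ ha)) h0'
      simp only [List.countP_cons]
      by_cases hb : p b = true
      · have hqb : q b = true := h b List.mem_cons_self hb
        rw [hb, hqb]
        omega
      · have hb' : p b = false := by simpa using hb
        simp [hb']
        split <;> omega

-- A's closure: repeat full passes while something changed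
def pvClosA (deps : List (List String × String)) (S : PySem.Set String) : PySem.Set String :=
  let r := pvPassA deps (S, false)
  if h : r.2 = true then pvClosA deps r.1 else r.1
termination_by deps.countP (fun d => !(S.contains d.2))
decreasing_by
  rcases pvPassA_changed deps (S, false) h with h2 | ⟨d0, hd0, hn, hm⟩
  · exact absurd h2 (by simp)
  · refine pvCountP_lt deps _ _ ?_ d0 hd0 ?_ ?_
    · intro a _ hpa
      simp only [Bool.not_eq_true'] at hpa ⊢
      by_cases hmem : a.2 ∈ S
      · have := pvPassA_mono deps (S, false) a.2 hmem
        rw [(PySem.Set.contains_iff _ _).2 this] at hpa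
        exact absurd hpa (by simp)
      · cases hcc : S.contains a.2
        · rfl
        · exact absurd ((PySem.Set.contains_iff _ _).1 hcc) hmem
    · simp only [Bool.not_eq_true']
      cases hcc : S.contains d0.2
      · rfl
      · exact absurd ((PySem.Set.contains_iff _ _).1 hcc) hn
    · simpa using hm

-- port of A: build dependencies, then for each atom f the closure of its variables,
-- then the list of attacked atoms (append-in-place to graph[f] = insert of the final list)
def build_attack_graph (query : List (Bool × String × Int × List String)) : List (Bool × String × Int × List String × List (Bool × String × Int × List String)) :=
  let atoms := query
  let deps := pvDepsA atoms
  (atoms.foldl (fun graph f =>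
    let fclos := pvClosA deps (PySem.Set.ofList f.2.2.2)
    let lst := atoms.foldl (fun lst g =>
      if g = f then lst
      else
        let gpk := PySem.Set.ofList (PySem.List.slice g.2.2.2 none (some g.2.2.1))
        if gpk = [] then lst
        else if gpk.issubset fclos then lst ++ [g]
        else lst) ([] : List (Bool × String × Int × List String))
    PySem.Dict.insert graph f lst) (PySem.Dict.empty : PySem.Dict (Bool × String × Int × List String) (List (Bool × String × Int × List String)))).items.map
    (fun p => (p.1.1, p.1.2.1, p.1.2.2.1, p.1.2.2.2, p.2))

-- ===== PORT B =====
-- B's dependency preamble is the same Python code as A's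
def pvDepsB (atoms : List (Bool × String × Int × List String)) : List (List String × String) :=
  atoms.foldl (fun deps a =>
    if !a.1 then
      let key := PySem.List.slice a.2.2.2 none (some a.2.2.1)
      a.2.2.2.foldl (fun deps var => if var ∈ key then deps else deps ++ [(key, var)]) deps
    else deps) []

-- dependencies[i][1] of Source B (i is always an index produced by the build loop, hence in range)
def pvVar (deps : List (List String × String)) (i : Nat) : String :=
  (PySem.List.pyGetD deps (i : Int) ([], "")).2

-- one dependency into (base, attribute-to-dependency index, free): its distinct-key-variable
-- count is appended to base, its index i is filed under every distinct key variable, and a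
-- key-less dependency's variable goes to 'free'
def pvIndexF (st : List Int × PySem.Dict String (List Nat) × List String)
    (d : List String × String) : List Int × PySem.Dict String (List Nat) × List String :=
  let kset := PySem.Set.ofList d.1
  let i := st.1.length
  let base := st.1 ++ [((kset.length : Nat) : Int)]
  if kset.isEmpty then (base, st.2.1, st.2.2 ++ [d.2])
  else (base, kset.foldl (fun idx k => idx.modify k [] (fun l => l ++ [i])) st.2.1, st.2.2)

-- Source B's (base, index, free)
def pvIndex (deps : List (List String × String)) :
    List Int × PySem.Dict String (List Nat) × List String :=
  deps.foldl pvIndexF (([] : List Int),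
    (PySem.Dict.empty : PySem.Dict String (List Nat)), ([] : List String))

-- Source B's push(x)
def pvPush (st : PySem.Set String × List String) (x : String) : PySem.Set String × List String :=
  if st.1.contains x then st else (st.1.add x, st.2 ++ [x])

-- body of the inner 'for i in index.get(v, [])' loop: decrement the counter, fire at zero
def pvTick (deps : List (List String × String))
    (st : PySem.Set String × List String × List Int) (i : Nat) :
    PySem.Set String × List String × List Int :=
  let cnt := st.2.2.set i (st.2.2.getD i 0 - 1)
  if cnt.getD i 0 == 0 then
    let x := pvVar deps i
    if st.1.contains x then (st.1, st.2.1, cnt)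
    else (st.1.add x, st.2.1 ++ [x], cnt)
  else (st.1, st.2.1, cnt)

-- the 'while wl' worklist loop; the fuel only makes the recursion structural (the
-- caller passes enough of it for the worklist to drain, proved in pvLoopB_main below)
def pvLoopB (deps : List (List String × String)) (index : PySem.Dict String (List Nat))
    (fuel : Nat) (closed : PySem.Set String) (wl : List String) (cnt : List Int) :
    PySem.Set String :=
  match fuel with
  | 0 => closed
  | fuel + 1 =>
    match wl with
    | [] => closed
    | v :: rest =>
      let st := (index.getD v []).foldl (pvTick deps) (closed, rest, cnt)
      pvLoopB deps index fuel st.1 st.2.1 st.2.2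

-- Source B's closure(seed): push the seed and the key-less variables, then run the
-- counter worklist starting from a fresh copy of base
def pvClosB (deps : List (List String × String)) (index : PySem.Dict String (List Nat))
    (base : List Int) (free : List String) (fuel : Nat) (seed : List String) :
    PySem.Set String :=
  let st0 := free.foldl pvPush (seed.foldl pvPush ((PySem.Set.empty : PySem.Set String), []))
  pvLoopB deps index fuel st0.1 st0.2 base

def build_attack_graph_alt (query : List (Bool × String × Int × List String)) : List (Bool × String × Int × List String × List (Bool × String × Int × List String)) :=
  let atoms := query
  let deps := pvDepsB atoms
  let ix := pvIndex deps
  (atoms.foldl (fun graph f =>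
    let fc := pvClosB deps ix.2.1 ix.1 ix.2.2 (f.2.2.2.length + deps.length + 1) f.2.2.2
    PySem.Dict.insert graph f (atoms.filter (fun g =>
      decide (g ≠ f) && !(PySem.List.slice g.2.2.2 none (some g.2.2.1)).isEmpty
        && (PySem.List.slice g.2.2.2 none (some g.2.2.1)).all (fun k => fc.contains k)))) (PySem.Dict.empty : PySem.Dict (Bool × String × Int × List String) (List (Bool × String × Int × List String)))).items.map
    (fun p => (p.1.1, p.1.2.1, p.1.2.2.1, p.1.2.2.2, p.2))

-- ===== PRECONDITION & SPEC =====
def Spec_build_attack_graph (query : List (Bool × String × Int × List String)) (out : List (Bool × String × Int × List String × List (Bool × String × Int × List String))) : Prop := out = build_attack_graph_alt query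
instance (query : List (Bool × String × Int × List String)) (out : List (Bool × String × Int × List String × List (Bool × String × Int × List String))) : Decidable (Spec_build_attack_graph query out) := by
  unfold Spec_build_attack_graph
  letI h1 : DecidableEq (List (Bool × String × Int × List String)) := inferInstance
  letI h2 : DecidableEq (Bool × String × Int × List String × List (Bool × String × Int × List String)) := by infer_instance
  infer_instance

-- ===== CLAIM (what is proved, stated in full; the proofs are below) =====
def Claim_equal_build_attack_graph : Prop := ∀ (query : List (Bool × String × Int × List String)), Dom_build_attack_graph query → Spec_build_attack_graph query (build_attack_graph query)

-- ===== LEMMAS AND PROOFS =====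

-- derivability of a variable from a start list via the functional dependencies
inductive pvDeriv (deps : List (List String × String)) (S : List String) : String → Prop
  | base (x : String) : x ∈ S → pvDeriv deps S x
  | step (key : List String) (v : String) : (key, v) ∈ deps →
      (∀ k ∈ key, pvDeriv deps S k) → pvDeriv deps S v

-- ---------- A's closure computes exactly derivability ----------

lemma pvClosA_eq_true (deps : List (List String × String)) (S : PySem.Set String)
    (h : (pvPassA deps (S, false)).2 = true) :
    pvClosA deps S = pvClosA deps (pvPassA deps (S, false)).1 := by
  rw [pvClosA]; simp only [h, dite_true]

lemma pvClosA_eq_false (deps : List (List String × String)) (S : PySem.Set String)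
    (h : (pvPassA deps (S, false)).2 = false) :
    pvClosA deps S = (pvPassA deps (S, false)).1 := by
  rw [pvClosA]; simp only [h, Bool.false_eq_true, dite_false]

lemma pvPassA_sound (deps : List (List String × String)) (S0 : List String) :
    ∀ (deps' : List (List String × String)), (∀ d ∈ deps', d ∈ deps) →
      ∀ (st : PySem.Set String × Bool), (∀ y ∈ st.1, pvDeriv deps S0 y) →
        ∀ y ∈ (pvPassA deps' st).1, pvDeriv deps S0 y := by
  intro deps'
  induction deps' with
  | nil => intro _ st hst y hy; exact hst y hy
  | cons d tl ih =>
    intro hsub st hst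
    simp only [pvPassA, List.foldl_cons]
    refine ih (fun d' hd' => hsub d' (List.mem_cons_of_mem _ hd')) (pvStepA st d) ?_
    by_cases hc : ((PySem.Set.ofList d.1).issubset st.1 && !(st.1.contains d.2)) = true
    · have hstep : pvStepA st d = (st.1.add d.2, true) := by unfold pvStepA; rw [if_pos hc]
      rw [hstep]
      intro z hz
      rcases (PySem.Set.mem_add st.1 d.2 z).1 hz with hz' | rfl
      · exact hst z hz'
      · have hkeys : ∀ k ∈ d.1, pvDeriv deps S0 k := by
          intro k hk
          have hss : (PySem.Set.ofList d.1).issubset st.1 = true := by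
            have hc' := hc
            simp only [Bool.and_eq_true] at hc'
            exact hc'.1
          exact hst k ((PySem.Set.issubset_iff _ _).1 hss k ((PySem.Set.mem_ofList d.1 k).2 hk))
        exact pvDeriv.step d.1 d.2 (by simpa using hsub d List.mem_cons_self) hkeys
    · have hstep : pvStepA st d = st := by unfold pvStepA; rw [if_neg hc]
      rw [hstep]; exact hst

lemma pvPassA_snd_true (deps' : List (List String × String)) :
    ∀ (st : PySem.Set String × Bool), st.2 = true → (pvPassA deps' st).2 = true := by
  induction deps' with
  | nil => intro st h; simpa [pvPassA] using h
  | cons d tl ih =>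
    intro st h
    simp only [pvPassA, List.foldl_cons]
    refine ih (pvStepA st d) ?_
    unfold pvStepA
    split
    · rfl
    · exact h

lemma pvPassA_unchanged (deps' : List (List String × String)) :
    ∀ (S : PySem.Set String), (pvPassA deps' (S, false)).2 = false →
      (pvPassA deps' (S, false)).1 = S ∧
      ∀ d ∈ deps', (PySem.Set.ofList d.1).issubset S = true → d.2 ∈ S := by
  induction deps' with
  | nil => intro S _; exact ⟨rfl, by intro d hd; cases hd⟩
  | cons d tl ih =>
    intro S h
    simp only [pvPassA, List.foldl_cons] at h ⊢
    by_cases hc : ((PySem.Set.ofList d.1).issubset S && !(S.contains d.2)) = true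
    · have hstep : pvStepA (S, false) d = (S.add d.2, true) := by unfold pvStepA; rw [if_pos hc]
      rw [hstep] at h
      have := pvPassA_snd_true tl (S.add d.2, true) rfl
      simp only [pvPassA] at this
      rw [this] at h
      cases h
    · have hstep : pvStepA (S, false) d = (S, false) := by unfold pvStepA; rw [if_neg hc]
      rw [hstep] at h ⊢
      obtain ⟨h1, h2⟩ := ih S h
      refine ⟨h1, ?_⟩
      intro d' hd'
      rcases List.mem_cons.1 hd' with rfl | hd''
      · intro hss
        by_contra hns
        apply hc
        have hcf : S.contains d'.2 = false := by
          cases hcc : S.contains d'.2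
          · rfl
          · exact absurd ((PySem.Set.contains_iff _ _).1 hcc) hns
        rw [hss, hcf]
        rfl
      · exact h2 d' hd''

lemma pvClosA_mono (deps : List (List String × String)) (S : PySem.Set String) :
    ∀ x ∈ S, x ∈ pvClosA deps S := by
  induction S using pvClosA.induct deps with
  | case1 S r h ih =>
    intro x hx
    have h' : (pvPassA deps (S, false)).2 = true := h
    rw [pvClosA_eq_true deps S h']
    exact ih x (pvPassA_mono deps (S, false) x hx)
  | case2 S r h =>
    intro x hx
    have h' : (pvPassA deps (S, false)).2 = false := by simpa using h
    rw [pvClosA_eq_false deps S h']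
    exact pvPassA_mono deps (S, false) x hx

lemma pvClosA_closed (deps : List (List String × String)) (S : PySem.Set String) :
    ∀ d ∈ deps, (∀ k ∈ d.1, k ∈ pvClosA deps S) → d.2 ∈ pvClosA deps S := by
  induction S using pvClosA.induct deps with
  | case1 S r h ih =>
    intro d hd hk
    have h' : (pvPassA deps (S, false)).2 = true := h
    rw [pvClosA_eq_true deps S h'] at hk ⊢
    exact ih d hd hk
  | case2 S r h =>
    intro d hd hk
    have h' : (pvPassA deps (S, false)).2 = false := by simpa using h
    rw [pvClosA_eq_false deps S h'] at hk ⊢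
    obtain ⟨h1, h2⟩ := pvPassA_unchanged deps S h'
    rw [h1] at hk ⊢
    refine h2 d hd ?_
    rw [PySem.Set.issubset_iff]
    intro k hk'
    exact hk k ((PySem.Set.mem_ofList d.1 k).1 hk')

lemma pvClosA_sound (deps : List (List String × String)) (S0 : List String) :
    ∀ (S : PySem.Set String), (∀ y ∈ S, pvDeriv deps S0 y) →
      ∀ x ∈ pvClosA deps S, pvDeriv deps S0 x := by
  intro S
  induction S using pvClosA.induct deps with
  | case1 S r h ih =>
    intro hS x hx
    have h' : (pvPassA deps (S, false)).2 = true := h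
    rw [pvClosA_eq_true deps S h'] at hx
    exact ih (pvPassA_sound deps S0 deps (fun d hd => hd) (S, false) hS) x hx
  | case2 S r h =>
    intro hS x hx
    have h' : (pvPassA deps (S, false)).2 = false := by simpa using h
    rw [pvClosA_eq_false deps S h'] at hx
    exact pvPassA_sound deps S0 deps (fun d hd => hd) (S, false) hS x hx

lemma pvClosA_mem (deps : List (List String × String)) (S0 : List String) (x : String) :
    x ∈ pvClosA deps (PySem.Set.ofList S0) ↔ pvDeriv deps S0 x := by
  constructor
  · exact pvClosA_sound deps S0 (PySem.Set.ofList S0)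
      (fun y hy => pvDeriv.base y ((PySem.Set.mem_ofList S0 y).1 hy)) x
  · intro h
    induction h with
    | base z hz => exact pvClosA_mono deps _ z ((PySem.Set.mem_ofList S0 z).2 hz)
    | step key v hmem hkeys ih => exact pvClosA_closed deps _ (key, v) hmem ih

-- ---------- basic facts ----------

lemma pvOfList_eq_nil_iff (xs : List String) : PySem.Set.ofList xs = [] ↔ xs = [] := by
  cases xs with
  | nil => simp
  | cons x tl =>
    constructor
    · intro h
      have hx : x ∈ PySem.Set.ofList (x :: tl) := (PySem.Set.mem_ofList _ _).2 List.mem_cons_self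
      rw [h] at hx
      cases hx
    · intro h; cases h

-- the i-th key set, as the proofs see it
def pvKset (deps : List (List String × String)) (i : Nat) : PySem.Set String :=
  PySem.Set.ofList (PySem.List.pyGetD deps (i : Int) ([], "")).1

lemma pvGetD_eq (deps : List (List String × String)) {i : Nat} (h : i < deps.length) :
    PySem.List.pyGetD deps (i : Int) ([], "") = deps[i] := by
  rw [PySem.List.pyGetD_natCast, List.getD_eq_getElem _ _ h]

-- ---------- the index build: base, buckets and the free list ----------

lemma pvBucket_inner (i : Nat) :
    ∀ (ks : List String), ks.Nodup →
      ∀ (idx : PySem.Dict String (List Nat)) (v : String),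
        (ks.foldl (fun idx k => idx.modify k [] (fun l => l ++ [i])) idx).getD v []
          = idx.getD v [] ++ (if v ∈ ks then [i] else []) := by
  intro ks
  induction ks with
  | nil => intro _ idx v; simp
  | cons k tl ih =>
    intro hnd idx v
    have hk : k ∉ tl := (List.nodup_cons.1 hnd).1
    simp only [List.foldl_cons]
    rw [ih (List.nodup_cons.1 hnd).2]
    by_cases hv : v = k
    · subst hv
      rw [PySem.Dict.getD_modify_self]
      simp [hk]
    · rw [PySem.Dict.getD_modify_of_ne _ _ _ hv]
      simp only [List.mem_cons]
      have : (v = k) = False := by simp [hv]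
      simp [hv]

lemma pvIndexF_base (st : List Int × PySem.Dict String (List Nat) × List String)
    (d : List String × String) :
    (pvIndexF st d).1 = st.1 ++ [(((PySem.Set.ofList d.1).length : Nat) : Int)] := by
  simp only [pvIndexF]
  split <;> rfl

lemma pvIndexF_bucket (st : List Int × PySem.Dict String (List Nat) × List String)
    (d : List String × String) (v : String) :
    (pvIndexF st d).2.1.getD v [] = st.2.1.getD v []
      ++ (if v ∈ PySem.Set.ofList d.1 then [st.1.length] else []) := by
  simp only [pvIndexF]
  by_cases he : (PySem.Set.ofList d.1).isEmpty
  · rw [if_pos he]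
    have h0 : PySem.Set.ofList d.1 = [] := by simpa [List.isEmpty_iff] using he
    simp [h0]
  · rw [if_neg he]
    exact pvBucket_inner st.1.length (PySem.Set.ofList d.1) (PySem.Set.nodup_ofList d.1) st.2.1 v

lemma pvIndexF_free (st : List Int × PySem.Dict String (List Nat) × List String)
    (d : List String × String) :
    (pvIndexF st d).2.2 = st.2.2 ++ (if d.1 = [] then [d.2] else []) := by
  simp only [pvIndexF]
  by_cases he : (PySem.Set.ofList d.1).isEmpty
  · rw [if_pos he]
    have h0 : d.1 = [] := (pvOfList_eq_nil_iff d.1).1 (by simpa [List.isEmpty_iff] using he)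
    simp [h0]
  · rw [if_neg he]
    have h0 : ¬ d.1 = [] := by
      intro hh
      apply he
      rw [List.isEmpty_iff, pvOfList_eq_nil_iff]
      exact hh
    simp [h0]

lemma pvIndexB_go (ds : List (List String × String)) :
    ∀ (st : List Int × PySem.Dict String (List Nat) × List String),
      ((ds.foldl pvIndexF st).1
          = st.1 ++ ds.map (fun d => (((PySem.Set.ofList d.1).length : Nat) : Int)))
      ∧ (∀ (v : String) (i0 : Nat), i0 ∈ (ds.foldl pvIndexF st).2.1.getD v [] ↔
           i0 ∈ st.2.1.getD v [] ∨ ∃ j d0, ds[j]? = some d0 ∧ i0 = st.1.length + j ∧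
             v ∈ PySem.Set.ofList d0.1)
      ∧ ((∀ v : String, (st.2.1.getD v []).Nodup ∧ ∀ i0 ∈ st.2.1.getD v [], i0 < st.1.length) →
          ∀ v : String, ((ds.foldl pvIndexF st).2.1.getD v []).Nodup ∧
            ∀ i0 ∈ (ds.foldl pvIndexF st).2.1.getD v [], i0 < (ds.foldl pvIndexF st).1.length)
      ∧ (∀ x : String, x ∈ (ds.foldl pvIndexF st).2.2 ↔ x ∈ st.2.2 ∨ ([], x) ∈ ds) := by
  induction ds with
  | nil =>
    intro st
    refine ⟨by simp, by simp, ?_, by simp⟩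
    intro h v
    simpa using h v
  | cons d tl ih =>
    intro st
    simp only [List.foldl_cons]
    obtain ⟨ih1, ih2, ih3, ih4⟩ := ih (pvIndexF st d)
    have hb := pvIndexF_base st d
    have hlen1 : (pvIndexF st d).1.length = st.1.length + 1 := by rw [hb]; simp
    refine ⟨?_, ?_, ?_, ?_⟩
    · rw [ih1, hb]
      simp
    · intro v i0
      rw [ih2, pvIndexF_bucket, hlen1]
      constructor
      · rintro (h | ⟨j, d0, hj, hi0, hv⟩)
        · rcases List.mem_append.1 h with h | h
          · exact Or.inl h
          · by_cases hvk : v ∈ PySem.Set.ofList d.1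
            · rw [if_pos hvk] at h
              refine Or.inr ⟨0, d, by simp, by simpa using h, hvk⟩
            · rw [if_neg hvk] at h
              cases h
        · exact Or.inr ⟨j + 1, d0, by simpa using hj, by omega, hv⟩
      · rintro (h | ⟨j, d0, hj, hi0, hv⟩)
        · exact Or.inl (List.mem_append_left _ h)
        · cases j with
          | zero =>
            have hd0 : d = d0 := by simpa using hj
            subst hd0
            refine Or.inl (List.mem_append_right _ ?_)
            rw [if_pos hv]
            simp [hi0]
          | succ j =>
            exact Or.inr ⟨j, d0, by simpa using hj, by omega, hv⟩
    · intro h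
      refine ih3 ?_
      intro v
      obtain ⟨hnd, hbd⟩ := h v
      rw [pvIndexF_bucket, hlen1]
      constructor
      · rw [List.nodup_append]
        refine ⟨hnd, ?_, ?_⟩
        · split <;> simp
        · intro a ha b hb
          have ha' : a < st.1.length := hbd a ha
          have hb' : b = st.1.length := by
            by_cases hvk : v ∈ PySem.Set.ofList d.1
            · rw [if_pos hvk] at hb; simpa using hb
            · rw [if_neg hvk] at hb; cases hb
          omega
      · intro i0 hi0
        rcases List.mem_append.1 hi0 with h' | h'
        · have := hbd i0 h'
          omega
        · have : i0 = st.1.length := by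
            by_cases hvk : v ∈ PySem.Set.ofList d.1
            · rw [if_pos hvk] at h'; simpa using h'
            · rw [if_neg hvk] at h'; cases h'
          omega
    · intro x
      rw [ih4, pvIndexF_free]
      obtain ⟨dk, dv⟩ := d
      simp only [List.mem_append, List.mem_cons, Prod.mk.injEq]
      constructor
      · rintro (h | h)
        · rcases h with h | h
          · exact Or.inl h
          · by_cases hk0 : dk = []
            · rw [if_pos (by simpa using hk0)] at h
              refine Or.inr (Or.inl ?_)
              subst hk0
              have hx : x = dv := by simpa using h
              simp [hx]
            · rw [if_neg (by simpa using hk0)] at h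
              cases h
        · exact Or.inr (Or.inr h)
      · rintro (h | (⟨h1, h2⟩ | h))
        · exact Or.inl (Or.inl h)
        · refine Or.inl (Or.inr ?_)
          rw [if_pos (by simp_all)]
          simp [h2]
        · exact Or.inr h

lemma pvBase_len (deps : List (List String × String)) :
    (pvIndex deps).1.length = deps.length := by
  have h := (pvIndexB_go deps (([] : List Int),
    (PySem.Dict.empty : PySem.Dict String (List Nat)), ([] : List String))).1
  unfold pvIndex
  rw [h]
  simp

lemma pvBase_val (deps : List (List String × String)) {j : Nat} (h : j < deps.length) :
    (pvIndex deps).1.getD j 0 = (((pvKset deps j).length : Nat) : Int) := by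
  have hgo := (pvIndexB_go deps (([] : List Int),
    (PySem.Dict.empty : PySem.Dict String (List Nat)), ([] : List String))).1
  unfold pvIndex
  rw [hgo]
  simp only [List.nil_append]
  have hj : j < (deps.map (fun d => (((PySem.Set.ofList d.1).length : Nat) : Int))).length := by
    simpa using h
  rw [List.getD_eq_getElem _ _ hj, List.getElem_map]
  unfold pvKset
  rw [pvGetD_eq deps h]

lemma pvBucket_spec (deps : List (List String × String)) (v : String) (i0 : Nat) :
    i0 ∈ (pvIndex deps).2.1.getD v [] ↔ i0 < deps.length ∧ v ∈ pvKset deps i0 := by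
  have hgo := (pvIndexB_go deps (([] : List Int),
    (PySem.Dict.empty : PySem.Dict String (List Nat)), ([] : List String))).2.1 v i0
  unfold pvIndex
  rw [hgo]
  simp only [PySem.Dict.getD_empty, List.not_mem_nil, false_or, List.length_nil, Nat.zero_add]
  constructor
  · rintro ⟨j, d0, hj, rfl, hv⟩
    obtain ⟨hlt, heq⟩ := List.getElem?_eq_some_iff.1 hj
    refine ⟨hlt, ?_⟩
    unfold pvKset
    rw [pvGetD_eq deps hlt, heq]
    exact hv
  · rintro ⟨hlt, hv⟩
    refine ⟨i0, deps[i0], List.getElem?_eq_some_iff.2 ⟨hlt, rfl⟩, rfl, ?_⟩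
    unfold pvKset at hv
    rwa [pvGetD_eq deps hlt] at hv

lemma pvBucket_nodup (deps : List (List String × String)) (v : String) :
    ((pvIndex deps).2.1.getD v []).Nodup := by
  have hgo := (pvIndexB_go deps (([] : List Int),
    (PySem.Dict.empty : PySem.Dict String (List Nat)), ([] : List String))).2.2.1
  unfold pvIndex
  exact (hgo (by simp) v).1

lemma pvFreeB_spec (deps : List (List String × String)) (x : String) :
    x ∈ (pvIndex deps).2.2 ↔ ([], x) ∈ deps := by
  have hgo := (pvIndexB_go deps (([] : List Int),
    (PySem.Dict.empty : PySem.Dict String (List Nat)), ([] : List String))).2.2.2 x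
  unfold pvIndex
  rw [hgo]
  simp

-- ---------- push-fold facts ----------

lemma pvPush_mem (xs : List String) :
    ∀ (st : PySem.Set String × List String) (y : String),
      y ∈ (xs.foldl pvPush st).1 ↔ y ∈ st.1 ∨ y ∈ xs := by
  induction xs with
  | nil => intro st y; simp
  | cons x tl ih =>
    intro st y
    simp only [List.foldl_cons, List.mem_cons]
    rw [ih]
    unfold pvPush
    by_cases hc : st.1.contains x = true
    · rw [if_pos hc]
      have hx : x ∈ st.1 := (PySem.Set.contains_iff _ _).1 hc
      constructor
      · rintro (h | h)
        · exact Or.inl h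
        · exact Or.inr (Or.inr h)
      · rintro (h | (rfl | h))
        · exact Or.inl h
        · exact Or.inl hx
        · exact Or.inr h
    · rw [if_neg hc]
      simp only [PySem.Set.mem_add]
      tauto

lemma pvPush_mirror (xs : List String) :
    ∀ (st : PySem.Set String × List String),
      (∀ y, y ∈ st.1 ↔ y ∈ st.2) →
      ∀ y, y ∈ (xs.foldl pvPush st).1 ↔ y ∈ (xs.foldl pvPush st).2 := by
  induction xs with
  | nil => intro st h; exact h
  | cons x tl ih =>
    intro st h
    simp only [List.foldl_cons]
    refine ih (pvPush st x) ?_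
    unfold pvPush
    by_cases hc : st.1.contains x = true
    · rw [if_pos hc]; exact h
    · rw [if_neg hc]
      intro y
      simp only [PySem.Set.mem_add, List.mem_append, List.mem_singleton]
      rw [h y]

lemma pvPush_nodup (xs : List String) :
    ∀ (st : PySem.Set String × List String), st.1.Nodup → (xs.foldl pvPush st).1.Nodup := by
  induction xs with
  | nil => intro st h; exact h
  | cons x tl ih =>
    intro st h
    simp only [List.foldl_cons]
    refine ih (pvPush st x) ?_
    unfold pvPush
    by_cases hc : st.1.contains x = true
    · rw [if_pos hc]; exact h
    · rw [if_neg hc]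
      exact PySem.Set.nodup_add _ _ h

lemma pvPush_wlnodup (xs : List String) :
    ∀ (st : PySem.Set String × List String),
      (∀ y, y ∈ st.1 ↔ y ∈ st.2) → st.2.Nodup → (xs.foldl pvPush st).2.Nodup := by
  induction xs with
  | nil => intro st _ h; exact h
  | cons x tl ih =>
    intro st hm h
    simp only [List.foldl_cons]
    by_cases hc : st.1.contains x = true
    · have hstep : pvPush st x = st := by unfold pvPush; rw [if_pos hc]
      rw [hstep]
      exact ih st hm h
    · have hstep : pvPush st x = (st.1.add x, st.2 ++ [x]) := by unfold pvPush; rw [if_neg hc]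
      rw [hstep]
      refine ih _ ?_ ?_
      · intro y
        simp only [PySem.Set.mem_add, List.mem_append, List.mem_singleton]
        rw [hm y]
      · rw [List.nodup_append]
        refine ⟨h, by simp, ?_⟩
        intro a ha b hb hab
        have hb' : b = x := by simpa using hb
        have hax : x ∈ st.2 := hb' ▸ hab ▸ ha
        exact hc ((PySem.Set.contains_iff _ _).2 ((hm x).2 hax))

lemma pvPush_len (xs : List String) :
    ∀ (st : PySem.Set String × List String),
      (xs.foldl pvPush st).1.length + st.2.length = st.1.length + (xs.foldl pvPush st).2.length := by
  induction xs with
  | nil => intro st; simp only [List.foldl_nil]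
  | cons x tl ih =>
    intro st
    simp only [List.foldl_cons]
    have h := ih (pvPush st x)
    unfold pvPush at *
    by_cases hc : st.1.contains x = true
    · rw [if_pos hc] at *; exact h
    · rw [if_neg hc] at *
      have hadd : (st.1.add x).length = st.1.length + 1 := by
        have hnm : x ∉ st.1 := fun hm => by
          rw [(PySem.Set.contains_iff _ _).2 hm] at hc; exact hc rfl
        rw [PySem.Set.add_of_not_mem hnm]
        simp
      simp only [hadd, List.length_append, List.length_cons, List.length_nil] at h ⊢
      omega

-- ---------- cardinality bound ----------

lemma pvAddFold_len (xs : List String) :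
    ∀ s : PySem.Set String, (xs.foldl PySem.Set.add s).length ≤ s.length + xs.length := by
  induction xs with
  | nil => intro s; simp
  | cons x tl ih =>
    intro s
    simp only [List.foldl_cons, List.length_cons]
    refine le_trans (ih (s.add x)) ?_
    have h : (s.add x).length ≤ s.length + 1 := by
      rw [PySem.Set.add_eq_ite]
      split
      · omega
      · simp
    omega

lemma pvOfList_len_le (xs : List String) : (PySem.Set.ofList xs).length ≤ xs.length := by
  have h := pvAddFold_len xs ([] : PySem.Set String)
  rw [PySem.Set.ofList_eq_foldl]
  simpa using h

lemma pvNodup_len_le (closed U : List String) (hnd : closed.Nodup)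
    (hsub : ∀ y ∈ closed, y ∈ U) :
    closed.length ≤ (PySem.Set.ofList U).length := by
  have h1 : closed.length = closed.toFinset.card := (List.toFinset_card_of_nodup hnd).symm
  have h2 : (PySem.Set.ofList U).length = (PySem.Set.ofList U).toFinset.card :=
    (List.toFinset_card_of_nodup (PySem.Set.nodup_ofList U)).symm
  rw [h1, h2]
  apply Finset.card_le_card
  intro y hy
  rw [List.mem_toFinset]
  exact (PySem.Set.mem_ofList U y).2 (hsub y (List.mem_toFinset.1 hy))

-- ---------- single-tick facts ----------

lemma pvTick_cnt (deps : List (List String × String))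
    (st : PySem.Set String × List String × List Int) (i : Nat) :
    (pvTick deps st i).2.2 = st.2.2.set i (st.2.2.getD i 0 - 1) := by
  simp only [pvTick]
  split
  · split <;> rfl
  · rfl

lemma pvTick_closed_cases (deps : List (List String × String))
    (st : PySem.Set String × List String × List Int) (i : Nat) :
    ((pvTick deps st i).1 = st.1 ∧ (pvTick deps st i).2.1 = st.2.1) ∨
    (pvVar deps i ∉ st.1 ∧ (pvTick deps st i).1 = st.1.add (pvVar deps i) ∧
      (pvTick deps st i).2.1 = st.2.1 ++ [pvVar deps i]) := by
  simp only [pvTick]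
  split
  · split
    · left; exact ⟨rfl, rfl⟩
    · right
      rename_i h2
      exact ⟨fun hm => h2 ((PySem.Set.contains_iff _ _).2 hm), rfl, rfl⟩
  · left; exact ⟨rfl, rfl⟩

lemma pvTick_new (deps : List (List String × String))
    (st : PySem.Set String × List String × List Int) (i : Nat) (y : String) :
    y ∈ (pvTick deps st i).1 →
    y ∈ st.1 ∨ (y = pvVar deps i ∧ (st.2.2.set i (st.2.2.getD i 0 - 1)).getD i 0 = 0) := by
  intro hy
  simp only [pvTick] at hy
  by_cases h1 : ((st.2.2.set i (st.2.2.getD i 0 - 1)).getD i 0 == 0) = true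
  · rw [if_pos h1] at hy
    by_cases h2 : st.1.contains (pvVar deps i) = true
    · rw [if_pos h2] at hy
      exact Or.inl hy
    · rw [if_neg h2] at hy
      rcases (PySem.Set.mem_add _ _ _).1 hy with h | h
      · exact Or.inl h
      · exact Or.inr ⟨h, by simpa using h1⟩
  · rw [if_neg h1] at hy
    exact Or.inl hy

lemma pvTick_fires (deps : List (List String × String))
    (st : PySem.Set String × List String × List Int) (i : Nat)
    (h : (st.2.2.set i (st.2.2.getD i 0 - 1)).getD i 0 = 0) :
    pvVar deps i ∈ (pvTick deps st i).1 := by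
  simp only [pvTick]
  rw [if_pos (by simpa using h)]
  by_cases h2 : st.1.contains (pvVar deps i) = true
  · rw [if_pos h2]
    exact (PySem.Set.contains_iff _ _).1 h2
  · rw [if_neg h2]
    exact (PySem.Set.mem_add _ _ _).2 (Or.inr rfl)

-- ---------- tick-fold facts ----------

lemma pvTickF_mono (deps : List (List String × String)) (L : List Nat) :
    ∀ (st : PySem.Set String × List String × List Int) (y : String),
      y ∈ st.1 → y ∈ (L.foldl (pvTick deps) st).1 := by
  induction L with
  | nil => intro st y h; exact h
  | cons i tl ih =>
    intro st y h
    simp only [List.foldl_cons]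
    refine ih (pvTick deps st i) y ?_
    rcases pvTick_closed_cases deps st i with ⟨h1, _⟩ | ⟨_, h1, _⟩
    · rw [h1]; exact h
    · rw [h1]; exact (PySem.Set.mem_add _ _ _).2 (Or.inl h)

lemma pvTickF_len (deps : List (List String × String)) (L : List Nat) :
    ∀ (st : PySem.Set String × List String × List Int),
      (L.foldl (pvTick deps) st).1.length + st.2.1.length =
        st.1.length + (L.foldl (pvTick deps) st).2.1.length := by
  induction L with
  | nil => intro st; simp only [List.foldl_nil]
  | cons i tl ih =>
    intro st
    simp only [List.foldl_cons]
    have h := ih (pvTick deps st i)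
    rcases pvTick_closed_cases deps st i with ⟨h1, h2⟩ | ⟨hnm, h1, h2⟩
    · rw [h1, h2] at h
      exact h
    · rw [h1, h2] at h
      rw [PySem.Set.add_of_not_mem hnm] at h
      simp only [List.length_append, List.length_cons, List.length_nil] at h ⊢
      omega

lemma pvTickF_nodup (deps : List (List String × String)) (L : List Nat) :
    ∀ (st : PySem.Set String × List String × List Int),
      st.1.Nodup → (L.foldl (pvTick deps) st).1.Nodup := by
  induction L with
  | nil => intro st h; exact h
  | cons i tl ih =>
    intro st h
    simp only [List.foldl_cons]
    refine ih (pvTick deps st i) ?_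
    rcases pvTick_closed_cases deps st i with ⟨h1, _⟩ | ⟨_, h1, _⟩
    · rw [h1]; exact h
    · rw [h1]; exact PySem.Set.nodup_add _ _ h

lemma pvTickF_wlsub (deps : List (List String × String)) (L : List Nat) :
    ∀ (st : PySem.Set String × List String × List Int),
      st.2.1.Nodup → (∀ y ∈ st.2.1, y ∈ st.1) →
      (L.foldl (pvTick deps) st).2.1.Nodup ∧
        (∀ y ∈ (L.foldl (pvTick deps) st).2.1, y ∈ (L.foldl (pvTick deps) st).1) := by
  induction L with
  | nil => intro st h1 h2; exact ⟨h1, h2⟩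
  | cons i tl ih =>
    intro st h1 h2
    simp only [List.foldl_cons]
    rcases pvTick_closed_cases deps st i with ⟨hc, hw⟩ | ⟨hnm, hc, hw⟩
    · refine ih (pvTick deps st i) (by rw [hw]; exact h1) ?_
      intro y hy
      rw [hw] at hy
      rw [hc]
      exact h2 y hy
    · refine ih (pvTick deps st i) ?_ ?_
      · rw [hw, List.nodup_append]
        refine ⟨h1, by simp, ?_⟩
        intro a ha b hb hab
        have hb' : b = pvVar deps i := by simpa using hb
        exact hnm (hb' ▸ hab ▸ h2 a ha)
      · intro y hy
        rw [hw] at hy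
        rw [hc]
        rcases List.mem_append.1 hy with h | h
        · exact (PySem.Set.mem_add _ _ _).2 (Or.inl (h2 y h))
        · have : y = pvVar deps i := by simpa using h
          exact (PySem.Set.mem_add _ _ _).2 (Or.inr this)

lemma pvTickF_R (deps : List (List String × String)) (L : List Nat) (popped : List String) :
    ∀ (st : PySem.Set String × List String × List Int),
      (∀ k, k ∈ st.1 ↔ k ∈ popped ∨ k ∈ st.2.1) →
      (∀ k ∈ st.2.1, k ∉ popped) →
      (∀ k, k ∈ (L.foldl (pvTick deps) st).1 ↔
          k ∈ popped ∨ k ∈ (L.foldl (pvTick deps) st).2.1) ∧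
        (∀ k ∈ (L.foldl (pvTick deps) st).2.1, k ∉ popped) := by
  induction L with
  | nil => intro st h1 h2; exact ⟨h1, h2⟩
  | cons i tl ih =>
    intro st h1 h2
    simp only [List.foldl_cons]
    rcases pvTick_closed_cases deps st i with ⟨hc, hw⟩ | ⟨hnm, hc, hw⟩
    · refine ih (pvTick deps st i) ?_ ?_
      · intro k; rw [hc, hw]; exact h1 k
      · intro k hk; rw [hw] at hk; exact h2 k hk
    · have hx : pvVar deps i ∉ popped := fun hp => hnm ((h1 _).2 (Or.inl hp))
      refine ih (pvTick deps st i) ?_ ?_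
      · intro k
        rw [hc, hw]
        simp only [PySem.Set.mem_add, List.mem_append, List.mem_singleton]
        rw [h1 k]
        tauto
      · intro k hk
        rw [hw] at hk
        rcases List.mem_append.1 hk with h | h
        · exact h2 k h
        · have : k = pvVar deps i := by simpa using h
          subst this
          exact hx

-- ---------- the counter bookkeeping through a bucket fold ----------

lemma pvCountP_insert (l : List String) (hnd : l.Nodup) (v : String) (popped : List String)
    (hv : v ∈ l) (hnp : v ∉ popped) :
    l.countP (fun k => !(decide (k ∈ popped))) =
      l.countP (fun k => !(decide (k ∈ popped ++ [v]))) + 1 := by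
  have hperm : l.Perm (v :: l.erase v) := List.perm_cons_erase hv
  rw [hperm.countP_eq, hperm.countP_eq]
  simp only [List.countP_cons]
  have hcong : (l.erase v).countP (fun k => !(decide (k ∈ popped))) =
      (l.erase v).countP (fun k => !(decide (k ∈ popped ++ [v]))) := by
    refine List.countP_congr ?_
    intro x hx
    have hxv : x ≠ v := ((List.Nodup.mem_erase_iff hnd).1 hx).1
    simp [List.mem_append, hxv]
  rw [hcong]
  simp [hnp]

lemma pvTickFold_main (deps : List (List String × String)) (popped' : List String) :
    ∀ (L : List Nat) (st : PySem.Set String × List String × List Int),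
      L.Nodup →
      (∀ i ∈ L, i < deps.length) →
      st.2.2.length = deps.length →
      (∀ j, j < deps.length → st.2.2.getD j 0 =
        (((pvKset deps j).countP (fun k => !(decide (k ∈ popped'))) : Nat) : Int)
          + (if j ∈ L then 1 else 0)) →
      ((L.foldl (pvTick deps) st).2.2.length = deps.length ∧
       (∀ j, j < deps.length → (L.foldl (pvTick deps) st).2.2.getD j 0 =
         (((pvKset deps j).countP (fun k => !(decide (k ∈ popped'))) : Nat) : Int)) ∧
       (∀ y ∈ (L.foldl (pvTick deps) st).1, y ∈ st.1 ∨ ∃ i, i < deps.length ∧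
          y = pvVar deps i ∧ ∀ k ∈ pvKset deps i, k ∈ popped') ∧
       (∀ i ∈ L, (∀ k ∈ pvKset deps i, k ∈ popped') →
          pvVar deps i ∈ (L.foldl (pvTick deps) st).1)) := by
  intro L
  induction L with
  | nil =>
    intro st _ _ hlen hval
    refine ⟨hlen, ?_, fun y hy => Or.inl hy, fun i hi => absurd hi (by simp)⟩
    intro j hj
    have := hval j hj
    simpa using this
  | cons i tl ih =>
    intro st hnd hL hlen hval
    have hi : i < deps.length := hL i List.mem_cons_self
    have hicnt : i < st.2.2.length := by omega
    have hint : i ∉ tl := (List.nodup_cons.1 hnd).1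
    have hvi := hval i hi
    rw [if_pos List.mem_cons_self] at hvi
    -- the decremented counter value at i is exactly the popped'-target
    have hset : (st.2.2.set i (st.2.2.getD i 0 - 1)).getD i 0 =
        (((pvKset deps i).countP (fun k => !(decide (k ∈ popped'))) : Nat) : Int) := by
      rw [List.getD_eq_getElem?_getD, List.getElem?_set_self hicnt]
      simp only [Option.getD_some]
      rw [hvi]
      omega
    have hcnt' : (pvTick deps st i).2.2 = st.2.2.set i (st.2.2.getD i 0 - 1) :=
      pvTick_cnt deps st i
    have hlen' : (pvTick deps st i).2.2.length = deps.length := by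
      rw [hcnt', List.length_set]
      exact hlen
    have hval' : ∀ j, j < deps.length → (pvTick deps st i).2.2.getD j 0 =
        (((pvKset deps j).countP (fun k => !(decide (k ∈ popped'))) : Nat) : Int)
          + (if j ∈ tl then 1 else 0) := by
      intro j hj
      rw [hcnt']
      by_cases hji : j = i
      · subst hji
        rw [hset]
        simp [hint]
      · rw [List.getD_eq_getElem?_getD, List.getElem?_set_ne (Ne.symm hji),
          ← List.getD_eq_getElem?_getD]
        rw [hval j hj]
        by_cases hjt : j ∈ tl
        · rw [if_pos (List.mem_cons_of_mem _ hjt), if_pos hjt]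
        · rw [if_neg (fun h => by
              rcases List.mem_cons.1 h with h' | h'
              · exact hji h'
              · exact hjt h'), if_neg hjt]
    obtain ⟨r1, r2, r3, r4⟩ := ih (pvTick deps st i) (List.nodup_cons.1 hnd).2
      (fun j hj => hL j (List.mem_cons_of_mem _ hj)) hlen' hval'
    refine ⟨by simpa using r1, by simpa using r2, ?_, ?_⟩
    · intro y hy
      simp only [List.foldl_cons] at hy
      rcases r3 y hy with h' | h'
      · rcases pvTick_new deps st i y h' with h'' | ⟨hE, hfire⟩
        · exact Or.inl h''
        · refine Or.inr ⟨i, hi, hE, ?_⟩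
          rw [hset] at hfire
          have h0 : (pvKset deps i).countP (fun k => !(decide (k ∈ popped'))) = 0 := by
            exact_mod_cast hfire
          intro k hk
          have := List.countP_eq_zero.1 h0 k hk
          simpa using this
      · exact Or.inr h'
    · intro i0 hi0 hsub
      simp only [List.foldl_cons]
      rcases List.mem_cons.1 hi0 with rfl | hi0'
      · have hzero : (st.2.2.set i0 (st.2.2.getD i0 0 - 1)).getD i0 0 = 0 := by
          rw [hset]
          have h0 : (pvKset deps i0).countP (fun k => !(decide (k ∈ popped'))) = 0 :=
            List.countP_eq_zero.2 (fun a ha => by simp [hsub a ha])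
          rw [h0]
          rfl
        exact pvTickF_mono deps tl _ _ (pvTick_fires deps st i0 hzero)
      · exact r4 i0 hi0' hsub

-- ---------- the worklist loop drains and computes derivability ----------

lemma pvLoopB_main (deps : List (List String × String)) (seed : List String)
    (index : PySem.Dict String (List Nat))
    (hIdxMem : ∀ (v : String) (i : Nat),
      i ∈ index.getD v [] ↔ i < deps.length ∧ v ∈ pvKset deps i)
    (hIdxNd : ∀ v : String, (index.getD v []).Nodup) :
    ∀ (fuel : Nat) (closed : PySem.Set String) (wl : List String) (cnt : List Int)
      (popped : List String),
      closed.Nodup → wl.Nodup →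
      (∀ k, k ∈ closed ↔ k ∈ popped ∨ k ∈ wl) →
      (∀ k ∈ wl, k ∉ popped) →
      (∀ y ∈ closed, y ∈ seed ++ deps.map Prod.snd) →
      cnt.length = deps.length →
      (∀ j, j < deps.length → cnt.getD j 0 =
        (((pvKset deps j).countP (fun k => !(decide (k ∈ popped))) : Nat) : Int)) →
      wl.length + ((PySem.Set.ofList (seed ++ deps.map Prod.snd)).length - closed.length) ≤ fuel →
      (∀ j, j < deps.length → (∀ k ∈ pvKset deps j, k ∈ popped) → pvVar deps j ∈ closed) →
      (∀ y ∈ closed, pvDeriv deps seed y) →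
      (∀ y ∈ closed, y ∈ pvLoopB deps index fuel closed wl cnt) ∧
      (∀ y ∈ pvLoopB deps index fuel closed wl cnt, pvDeriv deps seed y) ∧
      (∀ j, j < deps.length →
        (∀ k ∈ pvKset deps j, k ∈ pvLoopB deps index fuel closed wl cnt) →
        pvVar deps j ∈ pvLoopB deps index fuel closed wl cnt) := by
  intro fuel
  induction fuel with
  | zero =>
    intro closed wl cnt popped hndC _ hR1 _ _ _ _ hfuel hinv hsnd
    have hwl : wl = [] := by
      cases wl with
      | nil => rfl
      | cons v rest => exact absurd hfuel (by simp only [List.length_cons]; omega)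
    subst hwl
    refine ⟨fun y hy => hy, hsnd, ?_⟩
    intro j hj hk
    refine hinv j hj ?_
    intro k hk'
    rcases (hR1 k).1 (hk k hk') with h | h
    · exact h
    · cases h
  | succ fuel ihf =>
    intro closed wl cnt popped hndC hndW hR1 hR2 hsubU hclen hcval hfuel hinv hsnd
    cases wl with
    | nil =>
      refine ⟨fun y hy => hy, hsnd, ?_⟩
      intro j hj hk
      refine hinv j hj ?_
      intro k hk'
      rcases (hR1 k).1 (hk k hk') with h | h
      · exact h
      · cases h
    | cons v rest =>
      have hloop : pvLoopB deps index (fuel + 1) closed (v :: rest) cnt =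
          pvLoopB deps index fuel
            ((index.getD v []).foldl (pvTick deps) (closed, rest, cnt)).1
            ((index.getD v []).foldl (pvTick deps) (closed, rest, cnt)).2.1
            ((index.getD v []).foldl (pvTick deps) (closed, rest, cnt)).2.2 := rfl
      set L := index.getD v [] with hLdef
      set st' := L.foldl (pvTick deps) (closed, rest, cnt) with hst'
      set popped' := popped ++ [v] with hpop'
      have hvCl : v ∈ closed := (hR1 v).2 (Or.inr List.mem_cons_self)
      have hvNp : v ∉ popped := hR2 v List.mem_cons_self
      have hvrest : v ∉ rest := (List.nodup_cons.1 hndW).1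
      have hpopmem : ∀ k, k ∈ popped' ↔ k ∈ popped ∨ k = v := by
        intro k
        simp [hpop', List.mem_append]
      -- counter invariant w.r.t. popped', with the bucket carrying the +1
      have hcval' : ∀ j, j < deps.length → cnt.getD j 0 =
          (((pvKset deps j).countP (fun k => !(decide (k ∈ popped'))) : Nat) : Int)
            + (if j ∈ L then 1 else 0) := by
        intro j hj
        rw [hcval j hj]
        by_cases hjL : j ∈ L
        · rw [if_pos hjL]
          have hvk : v ∈ pvKset deps j := ((hIdxMem v j).1 hjL).2
          have := pvCountP_insert (pvKset deps j) (PySem.Set.nodup_ofList _) v popped hvk hvNp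
          rw [hpop'] at *
          rw [this]
          push_cast
          ring
        · rw [if_neg hjL]
          have hvk : v ∉ pvKset deps j := fun hm => hjL ((hIdxMem v j).2 ⟨hj, hm⟩)
          have hcong : (pvKset deps j).countP (fun k => !(decide (k ∈ popped))) =
              (pvKset deps j).countP (fun k => !(decide (k ∈ popped'))) := by
            refine List.countP_congr ?_
            intro x hx
            have hxv : x ≠ v := fun h => hvk (h ▸ hx)
            simp [hpopmem, hxv]
          rw [hcong]
          simp
      obtain ⟨m1, m2, m3, m4⟩ := pvTickFold_main deps popped' L (closed, rest, cnt)
        (hIdxNd v) (fun i hi => ((hIdxMem v i).1 hi).1) hclen hcval'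
      have hmono : ∀ y ∈ closed, y ∈ st'.1 := fun y hy => pvTickF_mono deps L _ y hy
      have hpopsub : ∀ k ∈ popped', k ∈ closed := by
        intro k hk
        rcases (hpopmem k).1 hk with h | rfl
        · exact (hR1 k).2 (Or.inl h)
        · exact hvCl
      -- facts feeding the induction hypothesis
      have hndC' : st'.1.Nodup := pvTickF_nodup deps L _ hndC
      have hwlsub : ∀ y ∈ rest, y ∈ closed := fun y hy =>
        (hR1 y).2 (Or.inr (List.mem_cons_of_mem _ hy))
      obtain ⟨hndW', hwlsub'⟩ := pvTickF_wlsub deps L (closed, rest, cnt)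
        (List.nodup_cons.1 hndW).2 hwlsub
      have hR1rest : ∀ k, k ∈ closed ↔ k ∈ popped' ∨ k ∈ rest := by
        intro k
        rw [hR1 k, hpopmem k]
        simp only [List.mem_cons]
        tauto
      have hR2rest : ∀ k ∈ rest, k ∉ popped' := by
        intro k hk hp
        rcases (hpopmem k).1 hp with h | rfl
        · exact hR2 k (List.mem_cons_of_mem _ hk) h
        · exact hvrest hk
      obtain ⟨hR1', hR2'⟩ := pvTickF_R deps L popped' (closed, rest, cnt) hR1rest hR2rest
      have hsubU' : ∀ y ∈ st'.1, y ∈ seed ++ deps.map Prod.snd := by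
        intro y hy
        rcases m3 y hy with h | ⟨i, hi, rfl, _⟩
        · exact hsubU y h
        · refine List.mem_append_right _ (List.mem_map.2 ⟨deps[i], List.getElem_mem hi, ?_⟩)
          unfold pvVar
          rw [pvGetD_eq deps hi]
      have hKc : closed.length ≤ (PySem.Set.ofList (seed ++ deps.map Prod.snd)).length :=
        pvNodup_len_le closed _ hndC hsubU
      have hKc' : st'.1.length ≤ (PySem.Set.ofList (seed ++ deps.map Prod.snd)).length :=
        pvNodup_len_le st'.1 _ hndC' hsubU'
      have hlenrel : st'.1.length + rest.length = closed.length + st'.2.1.length :=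
        pvTickF_len deps L (closed, rest, cnt)
      have hfuel' : st'.2.1.length +
          ((PySem.Set.ofList (seed ++ deps.map Prod.snd)).length - st'.1.length) ≤ fuel := by
        simp only [List.length_cons] at hfuel
        omega
      have hinv' : ∀ j, j < deps.length → (∀ k ∈ pvKset deps j, k ∈ popped') →
          pvVar deps j ∈ st'.1 := by
        intro j hj hk
        by_cases hvk : v ∈ pvKset deps j
        · exact m4 j ((hIdxMem v j).2 ⟨hj, hvk⟩) hk
        · refine hmono _ (hinv j hj ?_)
          intro k hk'
          rcases (hpopmem k).1 (hk k hk') with h | rfl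
          · exact h
          · exact absurd hk' hvk
      have hsnd' : ∀ y ∈ st'.1, pvDeriv deps seed y := by
        intro y hy
        rcases m3 y hy with h | ⟨i, hi, rfl, hkeys⟩
        · exact hsnd y h
        · have hdep : (deps[i].1, deps[i].2) ∈ deps := by
            have := List.getElem_mem hi
            simpa using this
          have hvar : pvVar deps i = deps[i].2 := by
            unfold pvVar
            rw [pvGetD_eq deps hi]
          rw [hvar]
          refine pvDeriv.step deps[i].1 deps[i].2 hdep ?_
          intro k hk
          have hkk : k ∈ pvKset deps i := by
            unfold pvKset
            rw [pvGetD_eq deps hi]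
            exact (PySem.Set.mem_ofList _ _).2 hk
          exact hsnd k (hpopsub k (hkeys k hkk))
      obtain ⟨r1, r2, r3⟩ := ihf st'.1 st'.2.1 st'.2.2 popped' hndC' hndW' hR1' hR2'
        hsubU' m1 m2 hfuel' hinv' hsnd'
      rw [hloop]
      exact ⟨fun y hy => r1 y (hmono y hy), r2, r3⟩

-- ---------- B's closure computes exactly derivability ----------

lemma pvClosB_mem (deps : List (List String × String)) (seed : List String) (x : String) :
    x ∈ pvClosB deps (pvIndex deps).2.1 (pvIndex deps).1 (pvIndex deps).2.2
        (seed.length + deps.length + 1) seed ↔ pvDeriv deps seed x := by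
  set st0 := (pvIndex deps).2.2.foldl pvPush
      (seed.foldl pvPush ((PySem.Set.empty : PySem.Set String), [])) with hst0
  have hmem0 : ∀ y, y ∈ st0.1 ↔ y ∈ seed ∨ y ∈ (pvIndex deps).2.2 := by
    intro y
    rw [hst0, pvPush_mem, pvPush_mem]
    have hememp : y ∈ ((PySem.Set.empty : PySem.Set String), ([] : List String)).1 ↔ False := by
      simp [PySem.Set.empty]
    rw [hememp]
    tauto
  have hmirror0 : ∀ y, y ∈ st0.1 ↔ y ∈ st0.2 :=
    pvPush_mirror _ _ (pvPush_mirror seed _ (fun y => by simp [PySem.Set.empty]))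
  have hnd0 : st0.1.Nodup :=
    pvPush_nodup _ _ (pvPush_nodup seed _ (by simp [PySem.Set.empty]))
  have hndw0 : st0.2.Nodup :=
    pvPush_wlnodup _ _ (pvPush_mirror seed _ (fun y => by simp [PySem.Set.empty]))
      (pvPush_wlnodup seed _ (fun y => by simp [PySem.Set.empty]) (by simp))
  have hlen0 : st0.1.length = st0.2.length := by
    have h1 := pvPush_len seed ((PySem.Set.empty : PySem.Set String), [])
    have h2 := pvPush_len (pvIndex deps).2.2
      (seed.foldl pvPush ((PySem.Set.empty : PySem.Set String), []))
    rw [hst0]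
    simp only [PySem.Set.empty, List.length_nil] at h1 h2 ⊢
    omega
  have hsubU : ∀ y ∈ st0.1, y ∈ seed ++ deps.map Prod.snd := by
    intro y hy
    rcases (hmem0 y).1 hy with h | h
    · exact List.mem_append_left _ h
    · exact List.mem_append_right _
        (List.mem_map.2 ⟨([], y), (pvFreeB_spec deps y).1 h, rfl⟩)
  have hsnd0 : ∀ y ∈ st0.1, pvDeriv deps seed y := by
    intro y hy
    rcases (hmem0 y).1 hy with h | h
    · exact pvDeriv.base y h
    · exact pvDeriv.step [] y ((pvFreeB_spec deps y).1 h) (by intro k hk; simp at hk)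
  have hinv0 : ∀ j, j < deps.length → (∀ k ∈ pvKset deps j, k ∈ ([] : List String)) →
      pvVar deps j ∈ st0.1 := by
    intro j hj hk
    have hks : pvKset deps j = [] := by
      cases hkk : pvKset deps j with
      | nil => rfl
      | cons a tl =>
        have := hk a (by rw [hkk]; exact List.mem_cons_self)
        cases this
    have hk1 : deps[j].1 = [] := by
      unfold pvKset at hks
      rw [pvGetD_eq deps hj] at hks
      exact (pvOfList_eq_nil_iff _).1 hks
    have hvar : pvVar deps j = deps[j].2 := by
      unfold pvVar
      rw [pvGetD_eq deps hj]
    have hdep : ([], deps[j].2) ∈ deps := by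
      have hm := List.getElem_mem hj
      have : deps[j] = ([], deps[j].2) := by
        cases hdj : deps[j] with
        | mk a b =>
          simp only at hk1 ⊢
          rw [hdj] at hk1
          simp only at hk1
          rw [hk1]
      rwa [this] at hm
    rw [hvar]
    exact (hmem0 _).2 (Or.inr ((pvFreeB_spec deps _).2 hdep))
  have hcval0 : ∀ j, j < deps.length → (pvIndex deps).1.getD j 0 =
      (((pvKset deps j).countP (fun k => !(decide (k ∈ ([] : List String)))) : Nat) : Int) := by
    intro j hj
    rw [pvBase_val deps hj]
    have h0 : (pvKset deps j).countP (fun k => !(decide (k ∈ ([] : List String)))) =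
        (pvKset deps j).length := by
      simp
    rw [h0]
  have hfuel : st0.2.length +
      ((PySem.Set.ofList (seed ++ deps.map Prod.snd)).length - st0.1.length) ≤
      seed.length + deps.length + 1 := by
    have hc0 : st0.1.length ≤ (PySem.Set.ofList (seed ++ deps.map Prod.snd)).length :=
      pvNodup_len_le _ _ hnd0 hsubU
    have hK : (PySem.Set.ofList (seed ++ deps.map Prod.snd)).length ≤
        seed.length + deps.length := by
      refine le_trans (pvOfList_len_le _) ?_
      simp
    omega
  obtain ⟨r1, r2, r3⟩ := pvLoopB_main deps seed (pvIndex deps).2.1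
    (fun v i => pvBucket_spec deps v i) (fun v => pvBucket_nodup deps v)
    (seed.length + deps.length + 1) st0.1 st0.2 (pvIndex deps).1 []
    hnd0 hndw0 (fun k => by rw [hmirror0 k]; simp) (by simp) hsubU
    (pvBase_len deps) hcval0 hfuel hinv0 hsnd0
  show x ∈ pvLoopB deps (pvIndex deps).2.1 (seed.length + deps.length + 1)
      st0.1 st0.2 (pvIndex deps).1 ↔ _
  constructor
  · exact r2 x
  · intro h
    induction h with
    | base z hz => exact r1 z ((hmem0 z).2 (Or.inl hz))
    | step key v hmemd hkeys ihh =>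
      obtain ⟨j, hj, hdj⟩ := List.getElem_of_mem hmemd
      have hkset : pvKset deps j = PySem.Set.ofList key := by
        unfold pvKset
        rw [pvGetD_eq deps hj, hdj]
      have hvar : pvVar deps j = v := by
        unfold pvVar
        rw [pvGetD_eq deps hj, hdj]
      rw [← hvar]
      refine r3 j hj ?_
      intro k hk
      rw [hkset] at hk
      exact ihh k ((PySem.Set.mem_ofList _ _).1 hk)

-- ---------- the two per-atom lists agree ----------

lemma pvList_eq (atoms : List (Bool × String × Int × List String))
    (f : Bool × String × Int × List String) :
    (atoms.foldl (fun lst g =>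
      if g = f then lst
      else
        let gpk := PySem.Set.ofList (PySem.List.slice g.2.2.2 none (some g.2.2.1))
        if gpk = [] then lst
        else if gpk.issubset (pvClosA (pvDepsA atoms) (PySem.Set.ofList f.2.2.2)) then lst ++ [g]
        else lst) []) =
    atoms.filter (fun g =>
      decide (g ≠ f) && !(PySem.List.slice g.2.2.2 none (some g.2.2.1)).isEmpty
        && (PySem.List.slice g.2.2.2 none (some g.2.2.1)).all (fun k =>
            (pvClosB (pvDepsB atoms) (pvIndex (pvDepsB atoms)).2.1 (pvIndex (pvDepsB atoms)).1
              (pvIndex (pvDepsB atoms)).2.2 (f.2.2.2.length + (pvDepsB atoms).length + 1) f.2.2.2).contains k)) := by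
  have hdeps : pvDepsB atoms = pvDepsA atoms := rfl
  have hmem : ∀ k : String,
      k ∈ pvClosA (pvDepsA atoms) (PySem.Set.ofList f.2.2.2) ↔
      k ∈ pvClosB (pvDepsB atoms) (pvIndex (pvDepsB atoms)).2.1 (pvIndex (pvDepsB atoms)).1
            (pvIndex (pvDepsB atoms)).2.2 (f.2.2.2.length + (pvDepsB atoms).length + 1) f.2.2.2 := by
    intro k
    rw [pvClosA_mem, hdeps, pvClosB_mem]
  have hstep : ∀ (lst : List (Bool × String × Int × List String)) g,
      (if g = f then lst
       else
         let gpk := PySem.Set.ofList (PySem.List.slice g.2.2.2 none (some g.2.2.1))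
         if gpk = [] then lst
         else if gpk.issubset (pvClosA (pvDepsA atoms) (PySem.Set.ofList f.2.2.2)) then lst ++ [g]
         else lst)
      = (if (decide (g ≠ f) && !(PySem.List.slice g.2.2.2 none (some g.2.2.1)).isEmpty
            && (PySem.List.slice g.2.2.2 none (some g.2.2.1)).all (fun k =>
                (pvClosB (pvDepsB atoms) (pvIndex (pvDepsB atoms)).2.1 (pvIndex (pvDepsB atoms)).1
                  (pvIndex (pvDepsB atoms)).2.2 (f.2.2.2.length + (pvDepsB atoms).length + 1) f.2.2.2).contains k)) = true
         then lst ++ [g] else lst) := by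
    intro lst g
    by_cases hgf : g = f
    · simp [hgf]
    · simp only [if_neg hgf]
      by_cases hpk : PySem.List.slice g.2.2.2 none (some g.2.2.1) = []
      · rw [if_pos ((pvOfList_eq_nil_iff _).2 hpk)]
        simp [hpk]
      · rw [if_neg (fun hh => hpk ((pvOfList_eq_nil_iff _).1 hh))]
        have hne : (PySem.List.slice g.2.2.2 none (some g.2.2.1)).isEmpty = false := by
          simpa [List.isEmpty_iff] using hpk
        have hsseq : (PySem.Set.ofList (PySem.List.slice g.2.2.2 none (some g.2.2.1))).issubset
              (pvClosA (pvDepsA atoms) (PySem.Set.ofList f.2.2.2)) =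
            (PySem.List.slice g.2.2.2 none (some g.2.2.1)).all (fun k =>
              (pvClosB (pvDepsB atoms) (pvIndex (pvDepsB atoms)).2.1 (pvIndex (pvDepsB atoms)).1
                  (pvIndex (pvDepsB atoms)).2.2 (f.2.2.2.length + (pvDepsB atoms).length + 1) f.2.2.2).contains k) := by
          rw [Bool.eq_iff_iff, PySem.Set.issubset_iff, List.all_eq_true]
          constructor
          · intro h k hk
            exact (PySem.Set.contains_iff _ _).2
              ((hmem k).1 (h k ((PySem.Set.mem_ofList _ _).2 hk)))
          · intro h k hk
            exact (hmem k).2 ((PySem.Set.contains_iff _ _).1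
              (h k ((PySem.Set.mem_ofList _ _).1 hk)))
        rw [hsseq]
        cases hss : (PySem.List.slice g.2.2.2 none (some g.2.2.1)).all (fun k =>
            (pvClosB (pvDepsB atoms) (pvIndex (pvDepsB atoms)).2.1 (pvIndex (pvDepsB atoms)).1
              (pvIndex (pvDepsB atoms)).2.2 (f.2.2.2.length + (pvDepsB atoms).length + 1) f.2.2.2).contains k) with
        | true => simp [hgf, hne]
        | false => simp [hgf, hne]
  calc (atoms.foldl (fun lst g =>
          if g = f then lst
          else
            let gpk := PySem.Set.ofList (PySem.List.slice g.2.2.2 none (some g.2.2.1))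
            if gpk = [] then lst
            else if gpk.issubset (pvClosA (pvDepsA atoms) (PySem.Set.ofList f.2.2.2)) then lst ++ [g]
            else lst) [])
      = atoms.foldl (fun lst g =>
          if (decide (g ≠ f) && !(PySem.List.slice g.2.2.2 none (some g.2.2.1)).isEmpty
            && (PySem.List.slice g.2.2.2 none (some g.2.2.1)).all (fun k =>
                (pvClosB (pvDepsB atoms) (pvIndex (pvDepsB atoms)).2.1 (pvIndex (pvDepsB atoms)).1
                  (pvIndex (pvDepsB atoms)).2.2 (f.2.2.2.length + (pvDepsB atoms).length + 1) f.2.2.2).contains k)) = true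
          then lst ++ [g] else lst) [] :=
        PySem.List.foldl_congr_mem atoms _ _ [] (fun acc x _ => hstep acc x)
    _ = _ := by
        simpa using PySem.List.foldl_append_if
          (fun g => decide (g ≠ f) && !(PySem.List.slice g.2.2.2 none (some g.2.2.1)).isEmpty
            && (PySem.List.slice g.2.2.2 none (some g.2.2.1)).all (fun k =>
                (pvClosB (pvDepsB atoms) (pvIndex (pvDepsB atoms)).2.1 (pvIndex (pvDepsB atoms)).1
                  (pvIndex (pvDepsB atoms)).2.2 (f.2.2.2.length + (pvDepsB atoms).length + 1) f.2.2.2).contains k))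
          (fun g => g) atoms []

-- ===== VERDICT (by name: the statement is the Claim_ definition above) =====
theorem build_attack_graph_spec : Claim_equal_build_attack_graph := by
  intro query _
  show build_attack_graph query = build_attack_graph_alt query
  unfold build_attack_graph build_attack_graph_alt
  refine congrArg (List.map _) (congrArg PySem.Dict.items ?_)
  apply PySem.List.foldl_congr_mem
  intro graph f _
  exact congrArg (fun l => PySem.Dict.insert graph f l) (pvList_eq query f)
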